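-- pv_equiv track=rewrite | github.com/Omkar02/FAANG | AZ_MaxCountNonOverlappingSubarraySumK.py | maxCountSubArr
-- ===== SOURCE A (Python) =====
-- def maxCountSubArr(arr, k):
--     ans = 0
--     n = len(arr)
--     runningSum = 0
--     preCalSum = set()
--     preCalSum.add(0)
--
--     for i in range(n):
--         runningSum += arr[i]
--         if runningSum - k in preCalSum:
--             ans += 1
--             runningSum = 0
--             preCalSum.clear()
--             preCalSum.add(0)
--
--         preCalSum.add(runningSum)
--
--     return ans
-- ===== SOURCE B (Python) =====
-- def maxCountSubArr(arr, k):
--     # Prefix-sum DP: bestAt maps a prefix-sum value to the best count achievable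
--     # at a position with that prefix; no greedy reset / set clearing.
--     best = 0
--     running = 0
--     bestAt = {0: 0}
--     for x in arr:
--         running += x
--         cand = bestAt.get(running - k)
--         if cand is not None and cand + 1 > best:
--             best = cand + 1
--         bestAt[running] = best
--     return best
-- ===== Notes on version B (the rewrite author's own statement) =====
-- stated objective: alternative
-- what changed: Replaces A's greedy scan that resets the running sum and clears its prefix-sum set after each counted subarray with a prefix-sum dynamic program over absolute prefix sums that never resets: a dict maps each prefix-sum value to the best count achievable at a position with that prefix, and the running best is updated from the entry at (prefix - k).
import Mathlib
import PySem

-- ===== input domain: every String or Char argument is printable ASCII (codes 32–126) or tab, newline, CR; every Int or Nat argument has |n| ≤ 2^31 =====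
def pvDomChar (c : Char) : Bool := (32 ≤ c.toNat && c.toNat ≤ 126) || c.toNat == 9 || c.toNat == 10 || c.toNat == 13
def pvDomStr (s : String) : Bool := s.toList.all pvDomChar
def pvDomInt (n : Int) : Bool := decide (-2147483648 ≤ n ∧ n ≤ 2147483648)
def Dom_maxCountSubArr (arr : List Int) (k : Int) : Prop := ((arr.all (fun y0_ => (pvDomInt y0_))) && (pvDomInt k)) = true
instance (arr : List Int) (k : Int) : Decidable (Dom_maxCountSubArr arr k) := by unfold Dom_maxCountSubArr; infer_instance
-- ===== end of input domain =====

-- B replaces A's greedy "cut and clear the prefix set" scan by a prefix-sum DP that keeps,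
-- per prefix-sum value, the best count reachable there (objective: alternative algorithm, same O(n) cost).

-- ===== PORT A =====
def maxCountSubArr (arr : List Int) (k : Int) : Int :=
  -- ans = 0; n = len(arr); runningSum = 0; preCalSum = {0}
  -- for i in range(n): runningSum += arr[i]; if runningSum-k in preCalSum: ans += 1; reset; preCalSum.add(runningSum)
  let n : Int := PySem.List.len arr
  let fin :=
    (PySem.List.pyRange 0 n).foldl
      (fun (st : Int × Int × PySem.Set Int) i =>
        let runningSum := st.2.1 + PySem.List.pyGetD arr i 0
        if PySem.Set.contains st.2.2 (runningSum - k) then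
          let ans := st.1 + 1
          let runningSum : Int := 0
          let preCalSum : PySem.Set Int := PySem.Set.add PySem.Set.empty 0
          (ans, runningSum, PySem.Set.add preCalSum runningSum)
        else
          (st.1, runningSum, PySem.Set.add st.2.2 runningSum))
      ((0 : Int), (0 : Int), PySem.Set.add PySem.Set.empty (0 : Int))
  fin.1

-- ===== PORT B =====
def maxCountSubArr_alt (arr : List Int) (k : Int) : Int :=
  -- best = 0; running = 0; bestAt = {0: 0}
  -- for x in arr: running += x; cand = bestAt.get(running-k); if cand is not None and cand+1 > best: best = cand+1; bestAt[running] = best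
  let fin :=
    arr.foldl
      (fun (st : Int × Int × PySem.Dict Int Int) x =>
        let running := st.2.1 + x
        let best :=
          match st.2.2.get? (running - k) with
          | some c => if c + 1 > st.1 then c + 1 else st.1
          | none => st.1
        (best, running, st.2.2.insert running best))
      ((0 : Int), (0 : Int), PySem.Dict.ofList [((0 : Int), (0 : Int))])
  fin.1

-- ===== PRECONDITION & SPEC =====
def Spec_maxCountSubArr (arr : List Int) (k : Int) (out : Int) : Prop := out = maxCountSubArr_alt arr k
instance (arr : List Int) (k : Int) (out : Int) : Decidable (Spec_maxCountSubArr arr k out) := by unfold Spec_maxCountSubArr; infer_instance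

-- ===== CLAIM (what is proved, stated in full; the proofs are below) =====
def Claim_equal_maxCountSubArr : Prop := ∀ (arr : List Int) (k : Int), Dom_maxCountSubArr arr k → Spec_maxCountSubArr arr k (maxCountSubArr arr k)

-- ===== LEMMAS AND PROOFS =====

-- A's loop body, on the element arr[i] itself
def pvStepA (k : Int) (st : Int × Int × PySem.Set Int) (y : Int) : Int × Int × PySem.Set Int :=
  let runningSum := st.2.1 + y
  if PySem.Set.contains st.2.2 (runningSum - k) then
    (st.1 + 1, 0, PySem.Set.add (PySem.Set.add PySem.Set.empty 0) 0)
  else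
    (st.1, runningSum, PySem.Set.add st.2.2 runningSum)

-- B's loop body
def pvStepB (k : Int) (st : Int × Int × PySem.Dict Int Int) (x : Int) : Int × Int × PySem.Dict Int Int :=
  let running := st.2.1 + x
  let best :=
    match st.2.2.get? (running - k) with
    | some c => if c + 1 > st.1 then c + 1 else st.1
    | none => st.1
  (best, running, st.2.2.insert running best)

lemma pvGet?_single (x : Int) (hx : x ≠ 0) :
    (PySem.Dict.ofList [((0 : Int), (0 : Int))]).get? x = none := by
  have h0 : ((0 : Int) == x) = false := by simpa using (Ne.symm hx)
  simp [PySem.Dict.ofList, PySem.Dict.get?, PySem.Dict.empty, PySem.Dict.insert,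
    PySem.Dict.update, PySem.Dict.contains, h0]

lemma portA_eq_foldl (arr : List Int) (k : Int) :
    maxCountSubArr arr k = (arr.foldl (pvStepA k)
      ((0 : Int), (0 : Int), PySem.Set.add PySem.Set.empty (0 : Int))).1 := by
  show (List.foldl (fun st i => pvStepA k st (PySem.List.pyGetD arr i 0))
      ((0 : Int), (0 : Int), PySem.Set.add PySem.Set.empty (0 : Int))
      (PySem.List.pyRange 0 (arr.length : Int))).1 = _
  rw [PySem.List.foldl_pyRange_zero_pyGetD' arr 0 (pvStepA k)]

lemma portB_eq_foldl (arr : List Int) (k : Int) :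
    maxCountSubArr_alt arr k = (arr.foldl (pvStepB k)
      ((0 : Int), (0 : Int), PySem.Dict.ofList [((0 : Int), (0 : Int))])).1 := rfl

-- The simulation relation between A's state (ans, runningSum, set of relative prefix sums
-- since the last cut) and B's state (best, running = absolute prefix sum, dict
-- prefix-sum ↦ best count at a position with that prefix); δ is the absolute
-- prefix sum at A's last cut.  Third clause: A's set holds exactly the (shifted)
-- prefix values whose stored best count equals the current best; fourth: all
-- stored counts are ≤ the current best.
def pvRel (sa : Int × Int × PySem.Set Int) (sb : Int × Int × PySem.Dict Int Int) (δ : Int) : Prop :=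
  sa.1 = sb.1 ∧ sa.2.1 = sb.2.1 - δ ∧
  (∀ x : Int, x ∈ sa.2.2 ↔ sb.2.2.get? (x + δ) = some sb.1) ∧
  (∀ y v : Int, sb.2.2.get? y = some v → v ≤ sb.1)

lemma pvRel_init : pvRel ((0 : Int), (0 : Int), PySem.Set.add PySem.Set.empty (0 : Int))
    ((0 : Int), (0 : Int), PySem.Dict.ofList [((0 : Int), (0 : Int))]) 0 := by
  refine ⟨rfl, by norm_num, ?_, ?_⟩
  · intro x
    simp only []
    constructor
    · intro hx
      have hx0 : x = 0 := by
        simpa [PySem.Set.add, PySem.Set.empty, PySem.Set.contains] using hx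
      subst hx0; decide
    · intro h
      by_cases hx0 : x = 0
      · subst hx0; decide
      · rw [show x + 0 = x from by ring, pvGet?_single x hx0] at h
        simp at h
  · intro y v h
    simp only [] at h
    by_cases hy : y = 0
    · subst hy
      have h0 : (PySem.Dict.ofList [((0 : Int), (0 : Int))]).get? 0 = some 0 := by decide
      rw [h0] at h
      simp at h
      omega
    · rw [pvGet?_single y hy] at h
      simp at h

lemma pvRel_step (k : Int) (sa : Int × Int × PySem.Set Int)
    (sb : Int × Int × PySem.Dict Int Int) (δ : Int) (x : Int)
    (h : pvRel sa sb δ) : ∃ δ', pvRel (pvStepA k sa x) (pvStepB k sb x) δ' := by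
  obtain ⟨a, r, S⟩ := sa
  obtain ⟨b, p, m⟩ := sb
  obtain ⟨hab, hrp, hmem, hbound⟩ := h
  simp only [] at hab hrp hmem hbound
  subst hab hrp
  have hkey : (p - δ + x) - k + δ = (p + x) - k := by ring
  by_cases hit : PySem.Set.contains S ((p - δ + x) - k) = true
  · -- A hits, so B's lookup at (p+x)-k finds the current best a and best becomes a+1
    have hS : ((p - δ + x) - k) ∈ S := (PySem.Set.contains_iff _ _).1 hit
    have hget : m.get? ((p + x) - k) = some a := by
      have := (hmem ((p - δ + x) - k)).1 hS
      rwa [hkey] at this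
    refine ⟨p + x, ?_⟩
    simp only [pvStepA, pvStepB, pvRel, hit, if_true, hget]
    have hcond : a + 1 > a := by omega
    simp only [hcond, if_pos]
    refine ⟨by trivial, by ring, ?_, ?_⟩
    · intro z
      constructor
      · intro hz
        have hz0 : z = 0 := by
          simpa [PySem.Set.add, PySem.Set.empty, PySem.Set.contains] using hz
        subst hz0
        rw [show (0 : Int) + (p + x) = p + x from by ring]
        exact PySem.Dict.get?_insert_self m (p + x) (a + 1)
      · intro hz
        by_cases hz0 : z = 0
        · subst hz0; decide
        · exfalso
          have hne : z + (p + x) ≠ p + x := by omega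
          rw [PySem.Dict.get?_insert_of_ne _ _ hne] at hz
          have hcontr : a + 1 ≤ a := hbound _ _ hz
          omega
    · intro y v hy
      rw [PySem.Dict.get?_insert] at hy
      split_ifs at hy with hyp
      · simp at hy; omega
      · exact (hbound _ _ hy).trans (le_of_lt (lt_add_one a))
  · -- A misses: every stored count at (p+x)-k (if any) is < a, so best stays a
    have hS : ((p - δ + x) - k) ∉ S := fun hin => hit ((PySem.Set.contains_iff _ _).2 hin)
    have hget : m.get? ((p + x) - k) ≠ some a := by
      intro hg
      exact hS ((hmem ((p - δ + x) - k)).2 (by rwa [hkey]))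
    have hbest : (match m.get? ((p + x) - k) with
        | some c => if c + 1 > a then c + 1 else a
        | none => a) = a := by
      cases hg : m.get? ((p + x) - k) with
      | none => rfl
      | some c =>
        have hcb : c ≤ a := hbound _ _ hg
        have hcne : c ≠ a := fun hcb' => hget (by rw [hg, hcb'])
        have hnc : ¬ (c + 1 > a) := by omega
        simp [hnc]
    refine ⟨δ, ?_⟩
    simp only [pvStepA, pvStepB, pvRel, hit, if_false, Bool.false_eq_true, hbest]
    refine ⟨by trivial, by ring, ?_, ?_⟩
    · intro z
      rw [PySem.Set.mem_add, PySem.Dict.get?_insert]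
      constructor
      · rintro (hz | hz)
        · split_ifs with hzp
          · rfl
          · exact (hmem z).1 hz
        · have : z + δ = p + x := by omega
          simp [this]
      · intro hz
        split_ifs at hz with hzp
        · right; omega
        · left; exact (hmem z).2 hz
    · intro y v hy
      rw [PySem.Dict.get?_insert] at hy
      split_ifs at hy with hyp
      · simp at hy; omega
      · exact hbound _ _ hy

lemma pvFoldl_rel (k : Int) : ∀ (l : List Int) (sa : Int × Int × PySem.Set Int)
    (sb : Int × Int × PySem.Dict Int Int) (δ : Int), pvRel sa sb δ →
    (l.foldl (pvStepA k) sa).1 = (l.foldl (pvStepB k) sb).1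
  | [], sa, sb, δ, h => h.1
  | x :: l, sa, sb, δ, h => by
    obtain ⟨δ', h'⟩ := pvRel_step k sa sb δ x h
    simpa using pvFoldl_rel k l _ _ δ' h'

-- ===== VERDICT (by name: the statement is the Claim_ definition above) =====
theorem maxCountSubArr_spec : Claim_equal_maxCountSubArr := by
  intro arr k _
  unfold Spec_maxCountSubArr
  rw [portA_eq_foldl, portB_eq_foldl]
  exact pvFoldl_rel k arr _ _ 0 pvRel_init
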